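-- pv_equiv track=rewrite | github.com/ThisIsCosine/NJU1 | SE1Python/Grammer.py | JudgeSequence
-- ===== SOURCE A (Python) =====
-- def JudgeSequence(KindOfToken: list):
--     Noun = False
--     for i in range(0, len(KindOfToken) - 1):
--         if KindOfToken[i] > KindOfToken[i + 1]:
--             return False
--         if KindOfToken[i] == 2 or KindOfToken[i + 1] == 2:
--             Noun = True
--         if KindOfToken[i] == 2 and KindOfToken[i + 1] == 2:
--             return False
--     if Noun == False:
--         return False
--     return True
-- ===== SOURCE B (Python) =====
-- def JudgeSequence(KindOfToken: list):
--     if len(KindOfToken) < 2: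
--         return False
--     if list(KindOfToken) != sorted(KindOfToken):
--         return False
--     return KindOfToken.count(2) == 1
-- ===== Notes on version B (the rewrite author's own statement) =====
-- stated objective: simpler
-- what changed: Replaces the merged adjacent-pair scan (order + noun flag + adjacent-2s) by a sort-compare for sortedness plus count(2)==1, which on a sorted list is exactly 'a 2 occurs and no two 2s are adjacent'.
import Mathlib
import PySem

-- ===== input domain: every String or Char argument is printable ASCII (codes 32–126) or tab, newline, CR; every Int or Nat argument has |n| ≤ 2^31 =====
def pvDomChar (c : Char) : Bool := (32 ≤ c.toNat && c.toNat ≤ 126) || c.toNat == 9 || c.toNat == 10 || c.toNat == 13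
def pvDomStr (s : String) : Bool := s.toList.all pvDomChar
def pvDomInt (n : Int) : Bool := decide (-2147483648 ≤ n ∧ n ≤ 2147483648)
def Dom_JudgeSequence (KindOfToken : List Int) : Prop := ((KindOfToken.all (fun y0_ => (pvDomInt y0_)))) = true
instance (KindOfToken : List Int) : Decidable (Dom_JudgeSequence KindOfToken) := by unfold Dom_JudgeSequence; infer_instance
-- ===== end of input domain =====

set_option maxRecDepth 4000


-- B replaces A's single adjacent-pair scan by a sort-compare plus count(2)==1 (objective: simpler).

-- ===== PORT A =====
-- A's loop over i in range(0, len-1) inspects (xs[i], xs[i+1]); ported as structural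
-- recursion over the same adjacent pairs, carrying the Noun flag.
def JudgeSequenceGo : List Int → Bool → Bool
  | a :: b :: rest, noun =>
      if a > b then false
      else
        let noun' := if a = 2 ∨ b = 2 then true else noun
        if a = 2 ∧ b = 2 then false
        else JudgeSequenceGo (b :: rest) noun'
  | _, noun => if noun = false then false else true

def JudgeSequence (KindOfToken : List Int) : Bool :=
  JudgeSequenceGo KindOfToken false

-- ===== PORT B =====
def JudgeSequence_alt (KindOfToken : List Int) : Bool :=
  if KindOfToken.length < 2 then false
  else if KindOfToken ≠ PySem.List.sorted KindOfToken (fun x => x) false then false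
  else PySem.List.count KindOfToken 2 == 1

-- ===== PRECONDITION & SPEC =====
def Spec_JudgeSequence (KindOfToken : List Int) (out : Bool) : Prop := out = JudgeSequence_alt KindOfToken
instance (KindOfToken : List Int) (out : Bool) : Decidable (Spec_JudgeSequence KindOfToken out) := by unfold Spec_JudgeSequence; infer_instance

-- ===== CLAIM (what is proved, stated in full; the proofs are below) =====
def Claim_equal_JudgeSequence : Prop := ∀ (KindOfToken : List Int), Dom_JudgeSequence KindOfToken → Spec_JudgeSequence KindOfToken (JudgeSequence KindOfToken)

-- ===== LEMMAS AND PROOFS =====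

-- consecutive-pair sortedness, and "no two adjacent 2s"
def chainLe : List Int → Bool
  | a :: b :: rest => decide (a ≤ b) && chainLe (b :: rest)
  | _ => true

def noAdj2 : List Int → Bool
  | a :: b :: rest => !(decide (a = 2) && decide (b = 2)) && noAdj2 (b :: rest)
  | _ => true

theorem go_eq (xs : List Int) : ∀ noun, JudgeSequenceGo xs noun =
    if xs.length < 2 then noun
    else chainLe xs && noAdj2 xs && (noun || xs.contains 2) := by
  induction xs with
  | nil => intro noun; simp [JudgeSequenceGo]
  | cons a tail ih =>
    intro noun
    cases tail with
    | nil => simp [JudgeSequenceGo]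
    | cons b rest =>
      rw [JudgeSequenceGo]
      by_cases hab : a > b
      · simp [chainLe, hab, not_le.mpr hab]
      · have hle : a ≤ b := not_lt.mp hab
        by_cases h22 : a = 2 ∧ b = 2
        · simp [h22, noAdj2]
        · simp only [hab, if_false, h22]
          rw [ih]
          cases rest with
          | nil =>
            by_cases hor : a = 2 ∨ b = 2 <;> cases noun <;>
              rw [Bool.eq_iff_iff] <;>
              simp [chainLe, noAdj2, hle] <;>
              tauto
          | cons c r =>
            by_cases hor : a = 2 ∨ b = 2 <;> cases noun <;>
              rw [Bool.eq_iff_iff] <;>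
              simp [chainLe, noAdj2, hle] <;>
              tauto

theorem chainLe_of_chain (xs : List Int) (h : List.IsChain (· ≤ ·) xs) : chainLe xs = true := by
  induction xs with
  | nil => rfl
  | cons a tail ih =>
    cases tail with
    | nil => rfl
    | cons b rest =>
      rw [List.isChain_cons_cons] at h
      simp [chainLe, h.1, ih h.2]

theorem chain_of_chainLe (xs : List Int) (h : chainLe xs = true) : List.IsChain (· ≤ ·) xs := by
  induction xs with
  | nil => simp
  | cons a tail ih =>
    cases tail with
    | nil => simp
    | cons b rest =>
      rw [chainLe, Bool.and_eq_true, decide_eq_true_iff] at h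
      exact List.isChain_cons_cons.mpr ⟨h.1, ih h.2⟩

theorem pairwise_of_chainLe (xs : List Int) (h : chainLe xs = true) :
    xs.Pairwise (fun a b : Int => a ≤ b) := by
  exact List.isChain_iff_pairwise.mp (chain_of_chainLe xs h)

theorem sorted_self_of_chainLe (xs : List Int) (h : chainLe xs = true) :
    PySem.List.sorted xs (fun x => x) false = xs :=
  PySem.List.sorted_eq_self_of_pairwise xs (fun x => x) (pairwise_of_chainLe xs h)

theorem chainLe_of_sorted_self (xs : List Int)
    (h : PySem.List.sorted xs (fun x => x) false = xs) : chainLe xs = true := by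
  have hp := PySem.List.sorted_pairwise xs (fun x : Int => x)
  rw [h] at hp
  exact chainLe_of_chain xs (hp.isChain)

-- in a sorted list whose head exceeds 2, no element equals 2
theorem count2_zero_of_gt (b : Int) (rest : List Int) (hc : chainLe (b :: rest) = true)
    (hb : 2 < b) : List.count 2 (b :: rest) = 0 := by
  induction rest generalizing b with
  | nil =>
    rw [List.count_cons, List.count_nil, if_neg (by simp; omega)]
  | cons c r ih =>
    rw [chainLe, Bool.and_eq_true, decide_eq_true_iff] at hc
    rw [List.count_cons, ih c hc.2 (by omega), if_neg (by simp; omega)]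

theorem noAdj2_of_not_mem (xs : List Int) (h : (2 : Int) ∉ xs) : noAdj2 xs = true := by
  induction xs with
  | nil => rfl
  | cons a tail ih =>
    cases tail with
    | nil => rfl
    | cons b rest =>
      have ha : ¬ a = 2 := fun h' => h (by simp [h'])
      have ih' := ih (fun h' => h (List.mem_cons_of_mem _ h'))
      simp [noAdj2, ha, ih']

-- the heart of B: on a sorted list, "some 2 and no adjacent 2s" is exactly count(2) = 1
theorem key_lemma (xs : List Int) (hc : chainLe xs = true) :
    (noAdj2 xs && xs.contains 2) = (PySem.List.count xs 2 == 1) := by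
  rw [PySem.List.count_eq, Bool.eq_iff_iff, Bool.and_eq_true]
  simp only [List.contains_iff_mem, Nat.beq_eq_true_eq]
  induction xs with
  | nil => simp
  | cons a tail ih =>
    cases tail with
    | nil =>
      by_cases ha : a = 2 <;> simp [noAdj2, ha]
      omega
    | cons b rest =>
      rw [chainLe, Bool.and_eq_true, decide_eq_true_iff] at hc
      obtain ⟨hab, hc2⟩ := hc
      by_cases ha : a = 2
      · by_cases hb : b = 2
        · -- adjacent 2s: both sides false (count ≥ 2)
          constructor
          · rintro ⟨hn, -⟩
            rw [noAdj2, Bool.and_eq_true] at hn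
            simp [ha, hb] at hn
          · intro hcnt
            exfalso
            rw [List.count_cons, List.count_cons] at hcnt
            simp [ha, hb] at hcnt
        · -- a = 2 < b: tail has no 2s, count = 1
          have hb2 : 2 < b := lt_of_le_of_ne (ha ▸ hab) (fun h => hb h.symm)
          have h0 : List.count 2 (b :: rest) = 0 := count2_zero_of_gt b rest hc2 hb2
          have hnm : (2 : Int) ∉ b :: rest := List.count_eq_zero.mp h0
          have hnoadj := noAdj2_of_not_mem (b :: rest) hnm
          constructor
          · intro _
            rw [List.count_cons (b := a), h0, if_pos (by simp [ha])]
          · intro _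
            refine ⟨?_, by simp [ha]⟩
            rw [noAdj2, Bool.and_eq_true]
            exact ⟨by simp [hb], hnoadj⟩
      · -- a ≠ 2: drop a on both sides and use the IH
        have hih := ih hc2
        rw [List.count_cons (b := a), if_neg (by simpa using ha)]
        rw [noAdj2, Bool.and_eq_true]
        constructor
        · rintro ⟨⟨-, hn⟩, hm⟩
          rcases List.mem_cons.mp hm with h | h
          · exact absurd h.symm ha
          · exact hih.mp ⟨hn, h⟩
        · intro hcnt
          obtain ⟨hn, hm⟩ := hih.mpr hcnt
          exact ⟨⟨by simp [ha], hn⟩, List.mem_cons_of_mem _ hm⟩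

-- ===== VERDICT (by name: the statement is the Claim_ definition above) =====
theorem JudgeSequence_spec : Claim_equal_JudgeSequence := by
  intro xs _
  unfold Spec_JudgeSequence JudgeSequence JudgeSequence_alt
  rw [go_eq]
  by_cases hlen : xs.length < 2
  · simp [hlen]
  · simp only [hlen, if_false]
    by_cases hch : chainLe xs = true
    · have hs : PySem.List.sorted xs (fun x => x) false = xs := sorted_self_of_chainLe xs hch
      simp only [hs, ne_eq, not_true_eq_false, if_false, hch, Bool.true_and, Bool.false_or]
      exact key_lemma xs hch
    · have hs : xs ≠ PySem.List.sorted xs (fun x => x) false := by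
        intro h; exact hch (chainLe_of_sorted_self xs h.symm)
      simp [hs, Bool.eq_false_iff.mpr hch]
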